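-- pv_equiv track=rewrite | github.com/sheilsplenbluli/csvwrangler | csvwrangler/dedup_report.py | duplicate_report
-- ===== SOURCE A (Python) =====
-- from collections import Counter
--
-- def _row_key(row: dict, columns: list[str] | None) -> tuple:
--     if columns:
--         return tuple(row.get(c, "") for c in columns)
--     return tuple(sorted(row.items()))
--
-- def duplicate_report(
--     rows: list[dict],
--     columns: list[str] | None = None,
--     count_col: str = "_dup_count",
--     rank_col: str = "_dup_rank",
--     include_unique: bool = False,
-- ) -> list[dict]:
--     """Return rows annotated with duplicate count and occurrence rank.
--
--     Args:
--         rows: input rows.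
--         columns: columns to consider for grouping; None means all columns.
--         count_col: name of the column that will hold the total duplicate count.
--         rank_col: name of the column that will hold the occurrence rank (1-based).
--         include_unique: if False, rows that appear only once are excluded.
--
--     Returns:
--         Annotated rows, preserving original order.
--     """
--     counts: Counter = Counter()
--     for row in rows:
--         counts[_row_key(row, columns)] += 1
--
--     seen: Counter = Counter()
--     result = []
--     for row in rows:
--         key = _row_key(row, columns)
--         total = counts[key]
--         if not include_unique and total < 2:
--             continue
--         seen[key] += 1
--         annotated = dict(row)
--         annotated[count_col] = str(total)
--         annotated[rank_col] = str(seen[key])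
--         result.append(annotated)
--     return result
-- ===== SOURCE B (Python) =====
-- def _key(row, columns):
--     if columns:
--         return tuple(row.get(c, "") for c in columns)
--     return tuple(sorted(row.items()))
--
--
-- def duplicate_report(
--     rows,
--     columns=None,
--     count_col="_dup_count",
--     rank_col="_dup_rank",
--     include_unique=False,
-- ):
--     """Partition-by-group: repeatedly peel off the whole group of the first pending
--     row's key, annotate it in one shot (count = group size, rank = enumerate order),
--     then restore the original row order by sorting on the original index."""
--     pending = [(i, row, _key(row, columns)) for i, row in enumerate(rows)]
--     out = []
--     while pending:
--         k = pending[0][2]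
--         group = [(i, row) for i, row, kk in pending if kk == k]
--         pending = [t for t in pending if t[2] != k]
--         if include_unique or len(group) >= 2:
--             for rank, (i, row) in enumerate(group, 1):
--                 d = dict(row)
--                 d[count_col] = str(len(group))
--                 d[rank_col] = str(rank)
--                 out.append((i, d))
--     out.sort(key=lambda t: t[0])
--     return [d for _, d in out]
-- ===== Notes on version B (the rewrite author's own statement) =====
-- stated objective: alternative
-- what changed: B replaces A's two counting passes (a Counter pass plus a re-scan with a running seen-Counter) by a partition recursion that repeatedly peels off the entire group of the first pending row's key, annotates that whole group at once (count = group size, rank = position in the group), and restores the original row order with a final stable sort on the original index.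
import Mathlib
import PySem

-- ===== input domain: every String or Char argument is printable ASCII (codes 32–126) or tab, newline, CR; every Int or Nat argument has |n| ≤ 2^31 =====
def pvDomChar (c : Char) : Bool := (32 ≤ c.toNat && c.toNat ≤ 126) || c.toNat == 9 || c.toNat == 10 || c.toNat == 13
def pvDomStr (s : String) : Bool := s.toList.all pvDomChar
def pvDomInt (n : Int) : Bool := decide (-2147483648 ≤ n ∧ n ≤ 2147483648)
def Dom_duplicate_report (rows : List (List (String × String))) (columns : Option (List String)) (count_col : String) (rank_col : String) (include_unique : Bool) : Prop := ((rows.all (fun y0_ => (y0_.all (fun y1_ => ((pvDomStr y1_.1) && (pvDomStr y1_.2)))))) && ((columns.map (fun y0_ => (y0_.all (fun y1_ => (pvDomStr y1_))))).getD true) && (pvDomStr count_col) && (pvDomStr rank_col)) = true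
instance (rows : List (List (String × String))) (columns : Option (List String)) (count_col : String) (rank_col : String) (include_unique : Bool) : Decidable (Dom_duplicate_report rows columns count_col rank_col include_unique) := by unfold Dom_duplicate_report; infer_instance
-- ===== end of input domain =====

-- B replaces A's two counting passes (a Counter, then a re-scan with a running seen-Counter)
-- by a partition recursion: repeatedly peel off the WHOLE group of the first pending row's key,
-- annotate that group in one shot (count = group size, rank = position in the group), and
-- restore the original row order at the end with a stable sort on the original index.

-- _row_key(row, columns): a tuple of column values when `columns` is truthy, else the
-- sorted items of the row; the columns branch carries each column name alongside its
-- looked-up value: `columns` is fixed for the whole call, so two rows get equal keys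
-- exactly when Python's value tuples are equal (shared by both ports).
def pyRowKey (row : List (String × String)) (columns : Option (List String)) : List (String × String) :=
  match columns with
  | some cols =>
      if cols.isEmpty then
        PySem.List.sorted2 (PySem.Dict.mk row).items (fun p => p.1) (fun p => p.2)
      else
        cols.map (fun c => (c, (PySem.Dict.mk row).getD c ""))
  | none => PySem.List.sorted2 (PySem.Dict.mk row).items (fun p => p.1) (fun p => p.2)

-- ===== PORT A =====
def duplicate_report (rows : List (List (String × String))) (columns : Option (List String)) (count_col : String) (rank_col : String) (include_unique : Bool) : List (List (String × String)) :=
  let counts : PySem.Dict (List (String × String)) Int :=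
    rows.foldl (fun d row => d.modify (pyRowKey row columns) 0 (· + 1)) PySem.Dict.empty
  (rows.foldl
    (fun (st : PySem.Dict (List (String × String)) Int × List (List (String × String))) row =>
      let key := pyRowKey row columns
      let total := counts.getD key 0
      if !include_unique && total < 2 then st
      else
        let seen := st.1.modify key 0 (· + 1)
        let annotated := ((PySem.Dict.mk row).insert count_col (PySem.Int.toStr total)).insert rank_col (PySem.Int.toStr (seen.getD key 0))
        (seen, st.2 ++ [annotated.items]))
    (PySem.Dict.empty, [])).2

-- ===== PORT B =====
-- the while-loop of Source B: peel off the first pending key's whole group, annotate it, recurse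
def bLoop (cc rc : String) (iu : Bool) : List (Int × List (String × String) × List (String × String)) → List (Int × List (String × String))
  | [] => []
  | t :: rest =>
    let k := t.2.2
    let group := ((t :: rest).filter (fun u => u.2.2 == k)).map (fun u => (u.1, u.2.1))
    let pending' := (t :: rest).filter (fun u => !(u.2.2 == k))
    (if iu || 2 ≤ (group.length : Int) then
      (PySem.List.enumerate group 1).map (fun p =>
        (p.2.1, (((PySem.Dict.mk p.2.2).insert cc (PySem.Int.toStr (group.length : Int))).insert rc (PySem.Int.toStr p.1)).items))
     else [])
    ++ bLoop cc rc iu pending'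
termination_by l => l.length
decreasing_by
  simp only [List.filter_cons, beq_self_eq_true, Bool.not_true, Bool.false_eq_true, if_false, List.length_cons]
  have := List.length_filter_le (fun u => !(u.2.2 == t.2.2)) rest
  omega

def duplicate_report_alt (rows : List (List (String × String))) (columns : Option (List String)) (count_col : String) (rank_col : String) (include_unique : Bool) : List (List (String × String)) :=
  let pending := (PySem.List.enumerate rows 0).map (fun p => (p.1, p.2, pyRowKey p.2 columns))
  let out := bLoop count_col rank_col include_unique pending
  (PySem.List.sorted out (fun t => t.1) false).map (fun t => t.2)   -- out.sort(key=lambda t: t[0])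

-- ===== PRECONDITION & SPEC =====
def Spec_duplicate_report (rows : List (List (String × String))) (columns : Option (List String)) (count_col : String) (rank_col : String) (include_unique : Bool) (out : List (List (String × String))) : Prop := out = duplicate_report_alt rows columns count_col rank_col include_unique
instance (rows : List (List (String × String))) (columns : Option (List String)) (count_col : String) (rank_col : String) (include_unique : Bool) (out : List (List (String × String))) : Decidable (Spec_duplicate_report rows columns count_col rank_col include_unique out) := by unfold Spec_duplicate_report; infer_instance

-- ===== CLAIM (what is proved, stated in full; the proofs are below) =====
def Claim_equal_duplicate_report : Prop := ∀ (rows : List (List (String × String))) (columns : Option (List String)) (count_col : String) (rank_col : String) (include_unique : Bool), Dom_duplicate_report rows columns count_col rank_col include_unique → Spec_duplicate_report rows columns count_col rank_col include_unique (duplicate_report rows columns count_col rank_col include_unique)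

-- ===== LEMMAS AND PROOFS =====

-- the annotated output row for a row with total count n and rank r (shape shared by both ports)
def annotRow (row : List (String × String)) (cc rc : String) (n r : Int) : List (String × String) :=
  (((PySem.Dict.mk row).insert cc (PySem.Int.toStr n)).insert rc (PySem.Int.toStr r)).items

-- common reference: walk the (row, key) pairs carrying the list of keys already seen (pre)
def goSpec (allKeys : List (List (String × String))) (iu : Bool) (cc rc : String) :
    List (List (String × String)) → List (List (String × String) × List (String × String)) → List (List (String × String))
  | _, [] => []
  | pre, (r, k) :: rest =>
      (if iu || 2 ≤ (allKeys.count k : Int) then [annotRow r cc rc (allKeys.count k) ((pre.count k : Int) + 1)] else [])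
      ++ goSpec allKeys iu cc rc (pre ++ [k]) rest

-- the first Counter loop of A counts keys
lemma foldl_modify_key (columns : Option (List String)) :
    ∀ (rs : List (List (String × String))) (d : PySem.Dict (List (String × String)) Int),
    rs.foldl (fun d row => d.modify (pyRowKey row columns) 0 (· + 1)) d
      = (rs.map (fun r => pyRowKey r columns)).foldl (fun d x => d.modify x 0 (· + 1)) d := by
  intro rs
  induction rs with
  | nil => intro d; rfl
  | cons r t ih => intro d; simp [ih]

lemma counts_getD (rows : List (List (String × String))) (columns : Option (List String)) (k : List (String × String)) :
    (rows.foldl (fun d row => d.modify (pyRowKey row columns) 0 (· + 1)) PySem.Dict.empty).getD k 0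
      = ((rows.map (fun r => pyRowKey r columns)).count k : Int) := by
  rw [foldl_modify_key, PySem.Dict.getD_foldl_modify_add_one]
  simp

-- the group of k has one member per occurrence of k
lemma posList_length (k : List (String × String)) :
    ∀ (keys : List (List (String × String))) (s : Int),
    (((PySem.List.enumerate keys s).filter (fun p => p.2 == k)).map (fun x => x.1)).length = keys.count k := by
  intro keys
  induction keys with
  | nil => intro s; simp [PySem.List.enumerate_nil]
  | cons x t ih =>
    intro s
    simp only [PySem.List.enumerate_cons, List.filter_cons, List.count_cons]
    by_cases h : x = k
    · subst h
      rw [show (((s, x).2 == x) = true) by simp]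
      simp [ih]
    · rw [show (((s, x).2 == k) = false) by simp [h]]
      simp [ih]

-- position within the group = occurrences of the key strictly before
lemma posList_index (k : List (String × String)) :
    ∀ (keys : List (List (String × String))) (s : Int) (j : Nat) (hj : j < keys.length),
    keys[j] = k →
    PySem.List.index? (((PySem.List.enumerate keys s).filter (fun p => p.2 == k)).map (fun x => x.1)) (s + j)
      = some ((keys.take j).count k) := by
  intro keys
  induction keys with
  | nil => intro s j hj; simp at hj
  | cons x t ih =>
    intro s j hj hk
    simp only [PySem.List.enumerate_cons, List.filter_cons]
    cases j with
    | zero =>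
      simp only [List.getElem_cons_zero] at hk
      subst hk
      rw [show ((s, x).2 == x) = true by simp]
      simp only [if_pos, List.map_cons, List.take_zero, List.count_nil]
      rw [show (s + ((0:Nat):Int)) = s by simp]
      exact PySem.List.index?_cons_self s _
    | succ j =>
      simp only [List.getElem_cons_succ] at hk
      have hj' : j < t.length := by simpa using hj
      have hrec := ih (s + 1) j hj' hk
      have h2 : (s : Int) + ((j + 1 : Nat) : Int) = (s + 1) + (j : Nat) := by push_cast; omega
      by_cases h : x = k
      · subst h
        rw [show ((s, x).2 == x) = true by simp, if_pos rfl]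
        simp only [List.map_cons, List.take_succ_cons, List.count_cons]
        have hne : (s : Int) ≠ s + ((j + 1 : Nat) : Int) := by
          push_cast
          omega
        rw [PySem.List.index?_cons_of_ne _ hne, h2, hrec]
        simp
      · rw [show ((s, x).2 == k) = false by simp [h], if_neg (by simp)]
        rw [List.take_succ_cons, List.count_cons, h2, hrec]
        simp [h]

-- A's second loop equals goSpec
lemma A_loop (columns : Option (List String)) (cc rc : String) (iu : Bool)
    (allKeys : List (List (String × String))) (counts : PySem.Dict (List (String × String)) Int)
    (hc : ∀ k, counts.getD k 0 = (allKeys.count k : Int)) :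
    ∀ (suf : List (List (String × String))) (pre : List (List (String × String)))
      (seen : PySem.Dict (List (String × String)) Int) (acc : List (List (String × String))),
    (∀ k, (iu = true ∨ 2 ≤ (allKeys.count k : Int)) → seen.getD k 0 = (pre.count k : Int)) →
    (suf.foldl
      (fun (st : PySem.Dict (List (String × String)) Int × List (List (String × String))) row =>
        let key := pyRowKey row columns
        let total := counts.getD key 0
        if !iu && total < 2 then st
        else
          let seen := st.1.modify key 0 (· + 1)
          let annotated := ((PySem.Dict.mk row).insert cc (PySem.Int.toStr total)).insert rc (PySem.Int.toStr (seen.getD key 0))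
          (seen, st.2 ++ [annotated.items]))
      (seen, acc)).2
    = acc ++ goSpec allKeys iu cc rc pre (suf.map (fun r => (r, pyRowKey r columns))) := by
  intro suf
  induction suf with
  | nil => intro pre seen acc hinv; simp [goSpec]
  | cons r t ih =>
    intro pre seen acc hinv
    simp only [List.foldl_cons, List.map_cons, goSpec]
    by_cases hpass : iu = true ∨ 2 ≤ (allKeys.count (pyRowKey r columns) : Int)
    · have hcond : (!iu && decide (counts.getD (pyRowKey r columns) 0 < 2)) = false := by
        rw [hc]
        rcases hpass with h | h
        · simp [h]
        · simp only [Bool.and_eq_false_iff, decide_eq_false_iff_not]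
          right
          omega
      have hseen : (seen.modify (pyRowKey r columns) 0 (· + 1)).getD (pyRowKey r columns) 0 = (pre.count (pyRowKey r columns) : Int) + 1 := by
        rw [PySem.Dict.getD_modify_self, hinv _ hpass]
      have hinv' : ∀ k, (iu = true ∨ 2 ≤ (allKeys.count k : Int)) → (seen.modify (pyRowKey r columns) 0 (· + 1)).getD k 0 = ((pre ++ [pyRowKey r columns]).count k : Int) := by
        intro k hk
        rw [PySem.Dict.getD_modify]
        by_cases hkk : k = pyRowKey r columns
        · subst hkk
          rw [if_pos rfl, hinv _ hk, List.count_append]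
          simp
        · rw [if_neg hkk, hinv k hk, List.count_append]
          simp [Ne.symm hkk]
      simp only [hcond, Bool.false_eq_true, if_false]
      rw [ih (pre ++ [pyRowKey r columns]) _ _ hinv']
      have hif : (iu || decide (2 ≤ ((allKeys.count (pyRowKey r columns) : Int)))) = true := by
        rcases hpass with h | h
        · simp [h]
        · simp only [Bool.or_eq_true, decide_eq_true_iff]
          right
          exact h
      rw [hc, hseen, hif]
      simp [annotRow]
    · have hcond : (!iu && decide (counts.getD (pyRowKey r columns) 0 < 2)) = true := by
        rw [hc]
        push_neg at hpass
        simp only [Bool.and_eq_true, Bool.not_eq_true', decide_eq_true_iff]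
        exact ⟨by simpa using hpass.1, by have := hpass.2; omega⟩
      have hinv' : ∀ k, (iu = true ∨ 2 ≤ (allKeys.count k : Int)) → seen.getD k 0 = ((pre ++ [pyRowKey r columns]).count k : Int) := by
        intro k hk
        rw [hinv k hk, List.count_append]
        have hne : k ≠ pyRowKey r columns := by
          intro he
          subst he
          exact hpass hk
        simp [Ne.symm hne]
      simp only [hcond, if_true]
      rw [ih (pre ++ [pyRowKey r columns]) seen acc hinv']
      have hif : (iu || decide (2 ≤ ((allKeys.count (pyRowKey r columns) : Int)))) = false := by
        push_neg at hpass
        simp only [Bool.or_eq_false_iff, decide_eq_false_iff_not]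
        exact ⟨by simpa using hpass.1, by have := hpass.2; omega⟩
      rw [hif]
      simp

-- ===== B-side lemmas =====

-- the per-triple output B produces, phrased over the full triple list allT
def groupFsts (allT : List (Int × List (String × String) × List (String × String))) (k : List (String × String)) : List Int :=
  (allT.filter (fun u => u.2.2 == k)).map (fun u => u.1)

def Fout (allT : List (Int × List (String × String) × List (String × String))) (iu : Bool) (cc rc : String)
    (t : Int × List (String × String) × List (String × String)) : Option (Int × List (String × String)) :=
  if iu || 2 ≤ ((allT.filter (fun u => u.2.2 == t.2.2)).length : Int) then
    some (t.1, annotRow t.2.1 cc rc ((allT.filter (fun u => u.2.2 == t.2.2)).length : Int)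
      ((((PySem.List.index? (groupFsts allT t.2.2) t.1).getD 0 : Nat) : Int) + 1))
  else none

lemma index?_getElem_nodup {α : Type} [BEq α] [LawfulBEq α] :
    ∀ (l : List α) (j : Nat) (h : j < l.length), l.Nodup → PySem.List.index? l l[j] = some j := by
  intro l
  induction l with
  | nil => intro j h; simp at h
  | cons x t ih =>
    intro j h hnd
    cases j with
    | zero => simpa using PySem.List.index?_cons_self x t
    | succ j =>
      have hj : j < t.length := by simpa using h
      have hmem : t[j] ∈ t := List.getElem_mem hj
      have hne : x ≠ t[j] := by
        intro he
        exact (List.nodup_cons.mp hnd).1 (he ▸ hmem)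
      simp only [List.getElem_cons_succ]
      rw [PySem.List.index?_cons_of_ne _ hne, ih j hj (List.nodup_cons.mp hnd).2]
      rfl

lemma bLoop_perm (cc rc : String) (iu : Bool)
    (allT : List (Int × List (String × String) × List (String × String)))
    (hp : allT.Pairwise (fun a b => a.1 < b.1)) :
    ∀ (n : Nat) (q : List (String × String) → Bool),
    (allT.filter (fun u => q u.2.2)).length ≤ n →
    (bLoop cc rc iu (allT.filter (fun u => q u.2.2))).Perm
      ((allT.filter (fun u => q u.2.2)).filterMap (Fout allT iu cc rc)) := by
  intro n
  induction n with
  | zero =>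
    intro q hlen
    have : allT.filter (fun u => q u.2.2) = [] := List.length_eq_zero_iff.mp (Nat.le_zero.mp hlen)
    rw [this]
    simp [bLoop]
  | succ n ih =>
    intro q hlen
    cases hL : allT.filter (fun u => q u.2.2) with
    | nil => simp [bLoop]
    | cons t rest =>
      have htmem : t ∈ allT.filter (fun u => q u.2.2) := by rw [hL]; exact List.mem_cons_self
      have hqt : q t.2.2 = true := (List.mem_filter.mp htmem).2
      set k := t.2.2 with hk
      -- the within-pending group is the full global group of k
      have hgroup : (t :: rest).filter (fun u => u.2.2 == k) = allT.filter (fun u => u.2.2 == k) := by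
        rw [← hL, List.filter_filter]
        apply List.filter_congr
        intro u _
        by_cases h : u.2.2 = k
        · simp [h, hqt]
        · simp [h]
      -- the new pending list is again a key-filter of allT
      have hpend : (t :: rest).filter (fun u => !(u.2.2 == k)) = allT.filter (fun u => q u.2.2 && !(u.2.2 == k)) := by
        rw [← hL, List.filter_filter]
        apply List.filter_congr
        intro u _
        exact Bool.and_comm _ _
      have hpendlen : (allT.filter (fun u => q u.2.2 && !(u.2.2 == k))).length ≤ n := by
        have h1 : (t :: rest).filter (fun u => !(u.2.2 == k)) = rest.filter (fun u => !(u.2.2 == k)) := by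
          simp [hk]
        have h2 := List.length_filter_le (fun u => !(u.2.2 == k)) rest
        have h3 : (t :: rest).length ≤ n + 1 := hL ▸ hlen
        rw [← hpend, h1]
        simp at h3
        omega
      -- group is a sublist of allT, so its indices are strictly increasing, hence nodup
      have hgsub : (allT.filter (fun u => u.2.2 == k)).Pairwise (fun a b => a.1 < b.1) :=
        List.Pairwise.sublist List.filter_sublist hp
      have hfst_nodup : (groupFsts allT k).Nodup := by
        unfold groupFsts
        exact (List.pairwise_map.mpr hgsub).imp (fun h => Int.ne_of_lt h)
      -- the annotated block equals filterMap Fout over the global group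
      have hcnt : ∀ u ∈ allT.filter (fun u => u.2.2 == k), u.2.2 = k := by
        intro u hu
        exact eq_of_beq (List.mem_filter.mp hu).2
      have hblock :
          (if iu || 2 ≤ ((((t :: rest).filter (fun u => u.2.2 == k)).map (fun u => (u.1, u.2.1))).length : Int) then
            (PySem.List.enumerate (((t :: rest).filter (fun u => u.2.2 == k)).map (fun u => (u.1, u.2.1))) 1).map (fun p =>
              (p.2.1, (((PySem.Dict.mk p.2.2).insert cc (PySem.Int.toStr ((((t :: rest).filter (fun u => u.2.2 == k)).map (fun u => (u.1, u.2.1))).length : Int))).insert rc (PySem.Int.toStr p.1)).items))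
           else [])
          = (allT.filter (fun u => u.2.2 == k)).filterMap (Fout allT iu cc rc) := by
        rw [hgroup]
        set G := allT.filter (fun u => u.2.2 == k) with hG
        by_cases hpass : (iu || decide (2 ≤ ((G.map (fun u => (u.1, u.2.1))).length : Int))) = true
        · rw [if_pos hpass]
          have hpassG : (iu || decide (2 ≤ ((G.length : Nat) : Int))) = true := by
            simpa using hpass
          have hFmap : G.filterMap (Fout allT iu cc rc)
              = G.map (fun u => (u.1, annotRow u.2.1 cc rc (G.length : Int)
                  ((((PySem.List.index? (groupFsts allT k) u.1).getD 0 : Nat) : Int) + 1))) := by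
            have : ∀ u ∈ G, Fout allT iu cc rc u
                = some (u.1, annotRow u.2.1 cc rc (G.length : Int)
                    ((((PySem.List.index? (groupFsts allT k) u.1).getD 0 : Nat) : Int) + 1)) := by
              intro u hu
              unfold Fout
              rw [hcnt u hu, ← hG, if_pos (by simpa using hpassG)]
            rw [List.filterMap_congr this, List.filterMap_eq_map']
          rw [hFmap]
          apply List.ext_getElem
          · simp [PySem.List.length_enumerate]
          · intro j h1 h2
            have hjG : j < G.length := by simpa [PySem.List.length_enumerate] using h1
            have hgf : groupFsts allT k = G.map (fun u => u.1) := by rw [hG]; rfl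
            have hidx : PySem.List.index? (groupFsts allT k) G[j].1 = some j := by
              have : G[j].1 = (G.map (fun u => u.1))[j]'(by simpa using hjG) := by simp
              rw [hgf, this]
              exact index?_getElem_nodup _ j (by simpa using hjG) (hgf ▸ hfst_nodup)
            simp only [List.getElem_map, PySem.List.getElem_enumerate, annotRow, hidx]
            have : ((1 : Int) + (j : Nat)) = (((j : Nat) : Int) + 1) := by omega
            simp [this]
        · rw [if_neg (by simpa using hpass)]
          symm
          rw [List.filterMap_eq_nil_iff]
          intro u hu
          unfold Fout
          rw [hcnt u hu, ← hG, if_neg]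
          simp only [Bool.or_eq_true, decide_eq_true_iff] at hpass ⊢
          push_neg at hpass ⊢
          exact ⟨hpass.1, by have := hpass.2; simpa using this⟩
      -- unfold one step of bLoop and chain the permutations
      have hperm2 := ih (fun x => q x && !(x == k)) hpendlen
      have e1 : bLoop cc rc iu (allT.filter (fun u => q u.2.2))
          = (allT.filter (fun u => u.2.2 == k)).filterMap (Fout allT iu cc rc)
            ++ bLoop cc rc iu (allT.filter (fun u => q u.2.2 && !(u.2.2 == k))) := by
        rw [hL]
        rw [bLoop]
        rw [hblock, hpend]
      have p3 : ((allT.filter (fun u => u.2.2 == k)).filterMap (Fout allT iu cc rc)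
            ++ bLoop cc rc iu (allT.filter (fun u => q u.2.2 && !(u.2.2 == k)))).Perm
          (((allT.filter (fun u => u.2.2 == k)) ++ (allT.filter (fun u => q u.2.2 && !(u.2.2 == k)))).filterMap (Fout allT iu cc rc)) := by
        rw [List.filterMap_append]
        exact List.Perm.append_left _ hperm2
      have p4 : (((allT.filter (fun u => u.2.2 == k)) ++ (allT.filter (fun u => q u.2.2 && !(u.2.2 == k)))).filterMap (Fout allT iu cc rc)).Perm
          ((allT.filter (fun u => q u.2.2)).filterMap (Fout allT iu cc rc)) := by
        apply List.Perm.filterMap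
        have h1 : allT.filter (fun u => u.2.2 == k) = (allT.filter (fun u => q u.2.2)).filter (fun u => u.2.2 == k) := by
          rw [← hgroup, hL]
        have h2 : allT.filter (fun u => q u.2.2 && !(u.2.2 == k)) = (allT.filter (fun u => q u.2.2)).filter (fun u => !(u.2.2 == k)) := by
          rw [List.filter_filter]
          apply List.filter_congr
          intro u _
          exact Bool.and_comm _ _
        rw [h1, h2]
        exact List.filter_append_perm _ _
      rw [← hL, e1]
      exact p3.trans p4

-- triples→pairs bridge: the group index lists coincide
lemma tri_fst (k : List (String × String)) :
    ∀ (pairs : List (List (String × String) × List (String × String))) (s : Int),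
    ((PySem.List.enumerate pairs s).filter (fun u => u.2.2 == k)).map (fun u => u.1)
      = ((PySem.List.enumerate (pairs.map (fun p => p.2)) s).filter (fun p => p.2 == k)).map (fun x => x.1) := by
  intro pairs
  induction pairs with
  | nil => intro s; simp [PySem.List.enumerate_nil]
  | cons p t ih =>
    intro s
    by_cases h : p.2 = k
    · subst h
      simp [PySem.List.enumerate_cons, ih]
    · simp [PySem.List.enumerate_cons, h, ih]

-- mapping snd over the filterMap'd triples gives goSpec
lemma Fout_goSpec (cc rc : String) (iu : Bool)
    (pairs : List (List (String × String) × List (String × String))) :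
    ∀ (suf : List (List (String × String) × List (String × String))) (j : Nat),
    pairs.drop j = suf →
    (((PySem.List.enumerate suf (j : Int)).filterMap (Fout (PySem.List.enumerate pairs 0) iu cc rc)).map (fun t => t.2))
      = goSpec (pairs.map (fun p => p.2)) iu cc rc ((pairs.map (fun p => p.2)).take j) suf := by
  intro suf
  induction suf with
  | nil => intro j hdrop; simp [PySem.List.enumerate_nil, goSpec]
  | cons p rest ih =>
    intro j hdrop
    have hj : j < pairs.length := by
      by_contra hge
      rw [List.drop_eq_nil_of_le (by omega)] at hdrop
      exact (List.cons_ne_nil p rest) hdrop.symm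
    have hget : pairs[j] = p := by
      have h0 : (pairs.drop j)[0]'(by rw [hdrop]; simp) = p := by
        simp only [hdrop]; rfl
      rw [List.getElem_drop] at h0
      simpa using h0
    have hdrop' : pairs.drop (j + 1) = rest := by
      have : pairs.drop (j + 1) = (pairs.drop j).drop 1 := by rw [List.drop_drop]
      rw [this, hdrop]; rfl
    have hkeyj : (pairs.map (fun p => p.2))[j]'(by simpa using hj) = p.2 := by simp [hget]
    have hcntlen : ((PySem.List.enumerate pairs 0).filter (fun u => u.2.2 == p.2)).length
        = (pairs.map (fun p => p.2)).count p.2 := by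
      have h1 : ((PySem.List.enumerate pairs 0).filter (fun u => u.2.2 == p.2)).length
          = (((PySem.List.enumerate pairs 0).filter (fun u => u.2.2 == p.2)).map (fun u => u.1)).length := by simp
      rw [h1, tri_fst]
      exact posList_length p.2 (pairs.map (fun p => p.2)) 0
    have hidx : PySem.List.index? (groupFsts (PySem.List.enumerate pairs 0) p.2) ((j : Nat) : Int)
        = some (((pairs.map (fun p => p.2)).take j).count p.2) := by
      unfold groupFsts
      rw [tri_fst]
      have := posList_index p.2 (pairs.map (fun p => p.2)) 0 j (by simpa using hj) hkeyj
      simpa using this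
    have htake : (pairs.map (fun p => p.2)).take (j + 1) = (pairs.map (fun p => p.2)).take j ++ [p.2] := by
      rw [List.take_add_one]
      have : (pairs.map (fun p => p.2))[j]? = some p.2 := by
        rw [List.getElem?_eq_getElem (by simpa using hj), hkeyj]
      rw [this]; rfl
    have hcast : ((j : Nat) : Int) + 1 = (((j + 1 : Nat) : Nat) : Int) := by push_cast; ring
    rw [PySem.List.enumerate_cons, List.filterMap_cons]
    cases p with
    | mk r k2 =>
      simp only [goSpec]
      by_cases hpass : (iu || decide (2 ≤ (((pairs.map (fun p => p.2)).count k2 : Int)))) = true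
      · have hF : Fout (PySem.List.enumerate pairs 0) iu cc rc ((j : Int), (r, k2))
            = some ((j : Int), annotRow r cc rc ((pairs.map (fun p => p.2)).count k2 : Int)
                (((((pairs.map (fun p => p.2)).take j).count k2 : Nat) : Int) + 1)) := by
          unfold Fout
          simp only [hcntlen, hidx]
          rw [if_pos (by simpa using hpass)]
          simp
        rw [hF]
        simp only [List.map_cons]
        rw [hcast, ih (j + 1) hdrop', htake, hpass]
        simp
      · have hF : Fout (PySem.List.enumerate pairs 0) iu cc rc ((j : Int), (r, k2)) = none := by
          unfold Fout
          simp only [hcntlen]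
          rw [if_neg (by simpa using hpass)]
        rw [hF, hcast, ih (j + 1) hdrop', htake]
        rw [show (iu || decide (2 ≤ (((pairs.map (fun p => p.2)).count k2 : Int)))) = false by simpa using hpass]
        simp
  
-- Source B's pending comprehension builds exactly enumerate(pairs)
lemma pending_eq (columns : Option (List String)) :
    ∀ (rows : List (List (String × String))) (s : Int),
    (PySem.List.enumerate rows s).map (fun p => (p.1, p.2, pyRowKey p.2 columns))
      = PySem.List.enumerate (rows.map (fun r => (r, pyRowKey r columns))) s := by
  intro rows
  induction rows with
  | nil => intro s; simp [PySem.List.enumerate_nil]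
  | cons r t ih => intro s; simp [PySem.List.enumerate_cons, ih]

theorem duplicate_report_spec : Claim_equal_duplicate_report := by
  intro rows columns cc rc iu _hdom
  unfold Spec_duplicate_report
  set pairs := rows.map (fun r => (r, pyRowKey r columns)) with hpairs
  set allT := PySem.List.enumerate pairs 0 with hallT
  -- B side
  have hpend := pending_eq columns rows 0
  have hptw : allT.Pairwise (fun a b => a.1 < b.1) := PySem.List.pairwise_lt_enumerate pairs 0
  have hfilter_true : allT.filter (fun u => (fun (_ : List (String × String)) => true) u.2.2) = allT := by
    simp
  have hperm := bLoop_perm cc rc iu allT hptw (allT.filter (fun u => (fun (_ : List (String × String)) => true) u.2.2)).length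
      (fun _ => true) le_rfl
  rw [hfilter_true] at hperm
  have hFptw : (allT.filterMap (Fout allT iu cc rc)).Pairwise (fun a b => a.1 < b.1) := by
    rw [List.pairwise_filterMap]
    apply hptw.imp_of_mem
    intro a b _ _ hab
    intro x hx y hy
    have hxa : x.1 = a.1 := by
      unfold Fout at hx
      split at hx
      · cases hx; rfl
      · cases hx
    have hyb : y.1 = b.1 := by
      unfold Fout at hy
      split at hy
      · cases hy; rfl
      · cases hy
    rw [hxa, hyb]; exact hab
  have hsorted : PySem.List.sorted (bLoop cc rc iu allT) (fun t => t.1) false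
      = allT.filterMap (Fout allT iu cc rc) :=
    PySem.List.sorted_eq_of_perm_of_pairwise_lt _ _ (fun t => t.1) hperm.symm hFptw
  have hB : duplicate_report_alt rows columns cc rc iu
      = (allT.filterMap (Fout allT iu cc rc)).map (fun t => t.2) := by
    unfold duplicate_report_alt
    rw [hpend, ← hpairs, ← hallT]
    simp only [hsorted]
  have hgo := Fout_goSpec cc rc iu pairs pairs 0 (by simp)
  simp only [← hallT, Nat.cast_zero, List.take_zero] at hgo
  have hkeys : pairs.map (fun p => p.2) = rows.map (fun r => pyRowKey r columns) := by
    rw [hpairs]; simp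
  -- A side
  have hA := A_loop columns cc rc iu (rows.map (fun r => pyRowKey r columns)) _ (counts_getD rows columns)
    rows [] PySem.Dict.empty [] (by intro k _; simp)
  simp only [duplicate_report]
  rw [hA, hB, hgo, hkeys, hpairs]
  simp
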